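-- pv_equiv track=rewrite | github.com/SimoesCTT/Documentation | src/bot_destroyer.py | _check_ctt_probing
-- ===== SOURCE A (Python) =====
-- from typing import Dict, List, Set, Optional, Tuple
--
-- def _check_ctt_probing(request_data: Dict) -> bool:
--     """Check if request is probing CTT framework"""
--     payload = str(request_data.get('payload', ''))
--     endpoint = request_data.get('endpoint', '')
--
--     ctt_indicators = [
--         '1.2294', '1.0222', '0.0302',  # Temporal constants
--         'temporal', 'spatial', 'framework',
--         '587000', '293500',  # Resonance frequencies
--         'convergent', 'ctt'
--     ]
--
--     combined = (payload + endpoint).lower()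
--     return any(indicator in combined for indicator in ctt_indicators)
-- ===== SOURCE B (Python) =====
-- CTT_INDICATORS = [
--     '1.2294', '1.0222', '0.0302',  # Temporal constants
--     'temporal', 'spatial', 'framework',
--     '587000', '293500',  # Resonance frequencies
--     'convergent', 'ctt'
-- ]
--
-- def _match_at(text, i, ind):
--     """Char-by-char comparison of ind against text starting at position i."""
--     j = 0
--     while j < len(ind):
--         if i + j >= len(text) or text[i + j] != ind[j]:
--             return False
--         j += 1
--     return True
--
-- def _check_ctt_probing(request_data):
--     """Check if request is probing CTT framework (index-based character matcher)."""
--     text = (str(request_data.get('payload', '')) + request_data.get('endpoint', '')).lower()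
--     for i in range(len(text)):
--         for ind in CTT_INDICATORS:
--             if _match_at(text, i, ind):
--                 return True
--     return False
-- ===== Notes on version B (the rewrite author's own statement) =====
-- stated objective: alternative
-- what changed: Replaces the indicator-major 'in' substring scans with an index-major double loop over string positions and a hand-rolled char-by-char matcher, so no substring-search primitive is used at all.
import Mathlib
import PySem

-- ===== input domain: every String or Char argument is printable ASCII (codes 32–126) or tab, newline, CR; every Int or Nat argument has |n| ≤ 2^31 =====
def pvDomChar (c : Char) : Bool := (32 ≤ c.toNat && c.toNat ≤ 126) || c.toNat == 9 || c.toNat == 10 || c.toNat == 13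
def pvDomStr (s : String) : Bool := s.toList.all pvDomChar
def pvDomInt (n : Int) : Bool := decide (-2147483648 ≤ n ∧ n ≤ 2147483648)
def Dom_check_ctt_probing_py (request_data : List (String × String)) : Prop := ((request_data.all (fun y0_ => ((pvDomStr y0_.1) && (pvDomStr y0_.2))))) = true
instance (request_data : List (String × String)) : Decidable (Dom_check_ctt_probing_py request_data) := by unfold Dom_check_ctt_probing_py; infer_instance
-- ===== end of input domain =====

-- B replaces the indicator-major `in` substring scans by an index-major double loop
-- with a hand-rolled char-by-char matcher (alternative decomposition; same asymptotic cost).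

-- ===== PORT A =====
def cttIndicatorsA : List String :=
  ["1.2294", "1.0222", "0.0302",
   "temporal", "spatial", "framework",
   "587000", "293500",
   "convergent", "ctt"]

def check_ctt_probing_py (request_data : List (String × String)) : Bool :=
  let payload := PySem.Dict.getD (PySem.Dict.mk request_data) "payload" ""
  let endpoint := PySem.Dict.getD (PySem.Dict.mk request_data) "endpoint" ""
  let combined := PySem.Str.lower (payload ++ endpoint)
  cttIndicatorsA.any (fun ind => PySem.Str.isIn ind combined)

-- ===== PORT B =====
def cttIndicatorsB : List (List Char) :=
  ["1.2294", "1.0222", "0.0302",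
   "temporal", "spatial", "framework",
   "587000", "293500",
   "convergent", "ctt"].map String.toList

-- the `while j < len(ind)` loop of Source B's _match_at, recursing on the rest of ind
-- (position p plays i + j; `i + j >= len(text)` is the none case of text[p]?)
def matchAt (text : List Char) : Nat → List Char → Bool
  | _, [] => true
  | p, c :: rest =>
    match text[p]? with
    | none => false
    | some d => if d = c then matchAt text (p + 1) rest else false

def check_ctt_probing_py_alt (request_data : List (String × String)) : Bool :=
  let text := (PySem.Str.lower
      (PySem.Dict.getD (PySem.Dict.mk request_data) "payload" ""
        ++ PySem.Dict.getD (PySem.Dict.mk request_data) "endpoint" "")).toList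
  (List.range text.length).any (fun i =>
    cttIndicatorsB.any (fun ind => matchAt text i ind))

-- ===== PRECONDITION & SPEC =====
def Spec_check_ctt_probing_py (request_data : List (String × String)) (out : Bool) : Prop := out = check_ctt_probing_py_alt request_data
instance (request_data : List (String × String)) (out : Bool) : Decidable (Spec_check_ctt_probing_py request_data out) := by unfold Spec_check_ctt_probing_py; infer_instance

-- ===== CLAIM (what is proved, stated in full; the proofs are below) =====
def Claim_equal_check_ctt_probing_py : Prop := ∀ (request_data : List (String × String)), Dom_check_ctt_probing_py request_data → Spec_check_ctt_probing_py request_data (check_ctt_probing_py request_data)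

-- ===== LEMMAS AND PROOFS =====

lemma cttIndicatorsB_eq : cttIndicatorsB = cttIndicatorsA.map String.toList := rfl

lemma cttIndicatorsB_ne_nil : ∀ l ∈ cttIndicatorsB, l ≠ [] := by decide

-- the char-by-char matcher recognises exactly "ind is a prefix of text.drop p"
lemma matchAt_iff (text : List Char) (ind : List Char) :
    ∀ p, matchAt text p ind = true ↔ ind <+: text.drop p := by
  induction ind with
  | nil => intro p; simp [matchAt]
  | cons c rest ih =>
    intro p
    simp only [matchAt]
    cases hg : text[p]? with
    | none =>
      have hp : text.length ≤ p := by
        rcases Nat.lt_or_ge p text.length with h | h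
        · rw [List.getElem?_eq_getElem h] at hg; cases hg
        · exact h
      simp only [List.drop_eq_nil_of_le hp]
      constructor
      · intro h; cases h
      · intro h; exact absurd (List.eq_nil_of_prefix_nil h) (by simp)
    | some d =>
      have hp : p < text.length := by
        by_contra h
        rw [List.getElem?_eq_none (by omega)] at hg; cases hg
      have hdrop : text.drop p = d :: text.drop (p + 1) := by
        have := List.getElem_cons_drop (as := text) (i := p) hp
        rw [List.getElem?_eq_getElem hp] at hg
        simpa [Option.some_inj.mp hg] using this.symm
      rw [hdrop]
      by_cases hd : d = c
      · subst hd; simp [ih (p + 1), List.cons_prefix_cons]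
      · simp only [hd, if_false, List.cons_prefix_cons]
        simp only [Bool.false_eq_true, false_iff]
        exact fun h => absurd h.1.symm hd

-- B's index-major double loop finds exactly the indicators occurring as infixes
lemma rangeScan_iff (text : List Char) :
    ((List.range text.length).any fun i =>
        cttIndicatorsB.any fun ind => matchAt text i ind) = true ↔
      ∃ l ∈ cttIndicatorsB, l <:+: text := by
  simp only [List.any_eq_true, List.mem_range]
  constructor
  · rintro ⟨i, _, l, hl, hm⟩
    exact ⟨l, hl, ((matchAt_iff text l i).mp hm).isInfix.trans (text.drop_suffix i).isInfix⟩
  · rintro ⟨l, hl, s, t, rfl⟩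
    refine ⟨s.length, ?_, l, hl, (matchAt_iff _ l s.length).mpr ?_⟩
    · have hln : l.length ≠ 0 := fun h => cttIndicatorsB_ne_nil l hl (List.eq_nil_of_length_eq_zero h)
      simp only [List.length_append]
      omega
    · rw [List.append_assoc, List.drop_left]
      exact ⟨t, rfl⟩

-- A's indicator-major `in` search equals B's index-major scan on any string
lemma searches_agree (s : String) :
    cttIndicatorsA.any (fun ind => PySem.Str.isIn ind s) =
      ((List.range s.toList.length).any fun i =>
        cttIndicatorsB.any fun ind => matchAt s.toList i ind) := by
  rcases hB : (List.range s.toList.length).any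
      (fun i => cttIndicatorsB.any fun ind => matchAt s.toList i ind) with _ | _
  · rw [List.any_eq_false]
    intro ind hind
    rw [Bool.not_eq_true, Bool.eq_false_iff]
    intro hin
    have : ∃ l ∈ cttIndicatorsB, l <:+: s.toList :=
      ⟨ind.toList, cttIndicatorsB_eq ▸ List.mem_map_of_mem hind,
        (PySem.Str.isIn_iff_infix _ _).mp hin⟩
    rw [(rangeScan_iff _).mpr this] at hB; cases hB
  · rcases (rangeScan_iff _).mp hB with ⟨l, hl, hinf⟩
    rw [cttIndicatorsB_eq] at hl
    rcases List.mem_map.mp hl with ⟨ind, hind, rfl⟩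
    exact List.any_eq_true.mpr ⟨ind, hind, (PySem.Str.isIn_iff_infix _ _).mpr hinf⟩

-- ===== VERDICT (by name: the statement is the Claim_ definition above) =====
theorem check_ctt_probing_py_spec : Claim_equal_check_ctt_probing_py := by
  intro rd _
  exact searches_agree
    (PySem.Str.lower (PySem.Dict.getD (PySem.Dict.mk rd) "payload" "" ++ PySem.Dict.getD (PySem.Dict.mk rd) "endpoint" ""))
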